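-- pv_equiv track=rewrite | github.com/jhreich2002/gentrack | news_pipeline/entities.py | _rule_based_lender_hints
-- ===== SOURCE A (Python) =====
-- _LENDER_SIGNAL_WORDS = {
--     "lender", "lenders", "financer", "financier", "financiers",
--     "debt provider", "credit facility", "credit facilities",
--     "bond issuer", "bondholder", "bondholders", "underwriter",
--     "syndicate", "syndicated", "loan", "revolving credit",
--     "term loan", "project finance", "debt", "financing",
--     "bank", "fund", "capital", "mortgage",
-- }
--
-- def _rule_based_lender_hints(text: str, orgs: list[str]) -> list[str]:
--     """Return ORG entities that appear near financial-role keywords.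
--
--     This is a cheap heuristic to narrow the candidate list before sending
--     to the LLM.
--     """
--     lower = text.lower()
--     hints: list[str] = []
--
--     for org in orgs:
--         # Check if the org name appears near a lender signal word
--         org_lower = org.lower()
--         idx = lower.find(org_lower)
--         if idx == -1:
--             continue
--         # Look at a ±200 char window around the mention
--         window = lower[max(0, idx - 200) : idx + len(org_lower) + 200]
--         if any(signal in window for signal in _LENDER_SIGNAL_WORDS):
--             hints.append(org)
--
--     return hints
-- ===== SOURCE B (Python) =====
-- _LENDER_SIGNAL_WORDS = {
--     "lender", "lenders", "financer", "financier", "financiers",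
--     "debt provider", "credit facility", "credit facilities",
--     "bond issuer", "bondholder", "bondholders", "underwriter",
--     "syndicate", "syndicated", "loan", "revolving credit",
--     "term loan", "project finance", "debt", "financing",
--     "bank", "fund", "capital", "mortgage",
-- }
--
-- def _signal_spans(lower: str) -> list[tuple[int, int]]:
--     """Every (start, end) occurrence of any signal word in the lowered text."""
--     n = len(lower)
--     return [
--         (s, s + len(sig))
--         for sig in _LENDER_SIGNAL_WORDS
--         for s in range(n - len(sig) + 1)
--         if lower[s:s + len(sig)] == sig
--     ]
--
-- def _rule_based_lender_hints(text: str, orgs: list[str]) -> list[str]: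
--     """Precompute every signal-word occurrence once; each org check is then
--     pure interval arithmetic over those spans instead of a substring scan of
--     a freshly built +-200-char window per org."""
--     lower = text.lower()
--     spans = _signal_spans(lower)
--     hints: list[str] = []
--     for org in orgs:
--         org_lower = org.lower()
--         idx = lower.find(org_lower)
--         if idx == -1:
--             continue
--         lo = max(0, idx - 200)
--         hi = idx + len(org_lower) + 200
--         if any(lo <= s and e <= hi for s, e in spans):
--             hints.append(org)
--     return hints
-- ===== Notes on version B (the rewrite author's own statement) =====
-- stated objective: alternative
-- what changed: All signal-word occurrence spans in the lowered text are precomputed once; each org's window test becomes interval arithmetic over those spans instead of running 24 substring searches over a freshly built ±200-char window slice per org.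
import Mathlib
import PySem

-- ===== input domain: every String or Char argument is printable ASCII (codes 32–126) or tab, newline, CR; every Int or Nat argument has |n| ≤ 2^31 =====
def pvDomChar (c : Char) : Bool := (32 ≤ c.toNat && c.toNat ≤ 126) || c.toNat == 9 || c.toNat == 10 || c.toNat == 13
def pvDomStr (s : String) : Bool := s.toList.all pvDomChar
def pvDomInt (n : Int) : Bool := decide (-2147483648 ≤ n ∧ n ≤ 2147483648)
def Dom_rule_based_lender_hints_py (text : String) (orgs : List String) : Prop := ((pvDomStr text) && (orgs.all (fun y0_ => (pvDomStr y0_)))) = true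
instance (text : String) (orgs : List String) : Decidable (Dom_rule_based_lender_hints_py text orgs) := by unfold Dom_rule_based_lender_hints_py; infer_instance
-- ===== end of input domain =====

-- B precomputes all signal-word occurrence spans once and replaces A's per-org window substring
-- scans by interval arithmetic over those spans; same return value, alternative algorithm.

-- _LENDER_SIGNAL_WORDS (a Python set of distinct literals; only membership-style `any` uses it)
def lenderSignals : List String :=
  ["lender", "lenders", "financer", "financier", "financiers",
   "debt provider", "credit facility", "credit facilities",
   "bond issuer", "bondholder", "bondholders", "underwriter",
   "syndicate", "syndicated", "loan", "revolving credit",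
   "term loan", "project finance", "debt", "financing",
   "bank", "fund", "capital", "mortgage"]

-- ===== PORT A =====
def rule_based_lender_hints_py (text : String) (orgs : List String) : List String :=
  let lower := PySem.Str.lower text
  orgs.foldl (fun hints org =>
    let orgLower := PySem.Str.lower org
    let idx := PySem.Str.find lower orgLower
    if idx = -1 then hints
    else
      let window := PySem.Str.slice lower (some (max 0 (idx - 200))) (some (idx + PySem.Str.len orgLower + 200))
      if lenderSignals.any (fun sig => PySem.Str.isIn sig window) then hints ++ [org]
      else hints) []

-- ===== PORT B =====
-- _signal_spans: every (start, end) occurrence of any signal word in the lowered text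
def signalSpans (lower : String) : List (Int × Int) :=
  let n := PySem.Str.len lower
  lenderSignals.flatMap (fun sig =>
    ((PySem.List.pyRange 0 (n - PySem.Str.len sig + 1) 1).filter
        (fun s => PySem.Str.slice lower (some s) (some (s + PySem.Str.len sig)) == sig)).map
      (fun s => (s, s + PySem.Str.len sig)))

def rule_based_lender_hints_py_alt (text : String) (orgs : List String) : List String :=
  let lower := PySem.Str.lower text
  let spans := signalSpans lower
  orgs.foldl (fun hints org =>
    let orgLower := PySem.Str.lower org
    let idx := PySem.Str.find lower orgLower
    if idx = -1 then hints
    else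
      let lo := max 0 (idx - 200)
      let hi := idx + PySem.Str.len orgLower + 200
      if spans.any (fun se => decide (lo ≤ se.1) && decide (se.2 ≤ hi)) then hints ++ [org]
      else hints) []

-- ===== PRECONDITION & SPEC =====
def Spec_rule_based_lender_hints_py (text : String) (orgs : List String) (out : List String) : Prop := out = rule_based_lender_hints_py_alt text orgs
instance (text : String) (orgs : List String) (out : List String) : Decidable (Spec_rule_based_lender_hints_py text orgs out) := by unfold Spec_rule_based_lender_hints_py; infer_instance

-- ===== CLAIM (what is proved, stated in full; the proofs are below) =====
def Claim_equal_rule_based_lender_hints_py : Prop := ∀ (text : String) (orgs : List String), Dom_rule_based_lender_hints_py text orgs → Spec_rule_based_lender_hints_py text orgs (rule_based_lender_hints_py text orgs)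

-- ===== LEMMAS AND PROOFS =====

-- `sub` occurs in the window ls[lo : lo+m] iff some full occurrence of `sub` in ls lies inside the bounds.
lemma infix_drop_take (ls sub : List Char) (lo m : Nat) :
    sub <:+: (ls.drop lo).take m ↔ ∃ s : Nat, lo ≤ s ∧ s + sub.length ≤ lo + m ∧ sub <+: ls.drop s := by
  constructor
  · intro h
    by_cases hs : sub = []
    · exact ⟨lo, le_refl _, by simp [hs], by simp [hs]⟩
    · obtain ⟨j, hj⟩ := (PySem.Chars.exists_prefix_drop_iff_isIn _ _).2
        ((PySem.Chars.isIn_iff_infix _ _).2 h)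
      rw [List.drop_take, List.drop_drop, List.prefix_take_iff] at hj
      obtain ⟨hpre, hlenle⟩ := hj
      have hpos : 0 < sub.length := List.length_pos_of_ne_nil hs
      exact ⟨lo + j, Nat.le_add_right _ _, by omega, hpre⟩
  · rintro ⟨s, hls, hle, hpre⟩
    have h1 : sub <+: ((ls.drop lo).drop (s - lo)) := by
      rw [List.drop_drop]
      have h : lo + (s - lo) = s := by omega
      rwa [h]
    have h2 : sub <+: ((ls.drop lo).take m).drop (s - lo) := by
      rw [List.drop_take, List.prefix_take_iff]
      exact ⟨h1, by omega⟩
    exact (PySem.Chars.isIn_iff_infix _ _).1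
      ((PySem.Chars.exists_prefix_drop_iff_isIn _ _).1 ⟨s - lo, h2⟩)

-- per-signal: A's `sig in window` equals B's "some precomputed span of sig fits the bounds"
lemma signal_window_iff (lower sig : String) (hsig : sig.toList ≠ []) (lo hi : Int)
    (h0 : 0 ≤ lo) (hlh : lo ≤ hi) :
    PySem.Str.isIn sig (PySem.Str.slice lower (some lo) (some hi)) = true ↔
      ∃ s : Int, (0 ≤ s ∧ s < (lower.toList.length : Int) - (sig.toList.length : Int) + 1) ∧
        (PySem.Str.slice lower (some s) (some (s + PySem.Str.len sig)) == sig) = true ∧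
        lo ≤ s ∧ s + PySem.Str.len sig ≤ hi := by
  have hpos : 0 < sig.toList.length := List.length_pos_of_ne_nil hsig
  have hLen : PySem.Str.len sig = (sig.toList.length : Int) := by simp [pysem]
  have hw : (PySem.Str.slice lower (some lo) (some hi)).toList
      = (lower.toList.drop lo.toNat).take (hi.toNat - lo.toNat) := by
    simp only [PySem.Str.toList_slice, PySem.Chars.slice_eq_listSlice]
    exact PySem.List.slice_toNat _ h0 (by omega)
  have hbeq : ∀ s : Int, 0 ≤ s →
      ((PySem.Str.slice lower (some s) (some (s + PySem.Str.len sig)) == sig) = true ↔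
        sig.toList <+: lower.toList.drop s.toNat) := by
    intro s hs
    rw [beq_iff_eq, ← String.toList_inj]
    have h2 : (PySem.Str.slice lower (some s) (some (s + PySem.Str.len sig))).toList
        = (lower.toList.drop s.toNat).take sig.toList.length := by
      simp only [PySem.Str.toList_slice, PySem.Chars.slice_eq_listSlice]
      rw [PySem.List.slice_toNat _ hs (by omega)]
      congr 1
      omega
    rw [h2, List.prefix_iff_eq_take]
    exact ⟨fun h => h.symm, fun h => h.symm⟩
  rw [PySem.Str.isIn_iff_infix, hw, infix_drop_take]
  constructor
  · rintro ⟨s, hls, hle, hpre⟩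
    have hslen : s + sig.toList.length ≤ lower.toList.length := by
      have := hpre.length_le
      rw [List.length_drop] at this
      by_cases hsl : s ≤ lower.toList.length
      · omega
      · rw [List.drop_eq_nil_of_le (by omega)] at hpre
        have := List.IsPrefix.length_le hpre
        simp at this
        omega
    refine ⟨(s : Int), ⟨by positivity, by omega⟩, ?_, by omega, ?_⟩
    · rw [hbeq _ (by positivity)]
      simpa using hpre
    · rw [hLen]; omega
  · rintro ⟨s, ⟨hs0, hsn⟩, hb, hlos, hshi⟩
    rw [hbeq _ hs0] at hb
    rw [hLen] at hshi
    exact ⟨s.toNat, by omega, by omega, hb⟩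

-- per-org condition: A's window test equals B's span test
lemma cond_eq (lower : String) (lo hi : Int) (h0 : 0 ≤ lo) (hlh : lo ≤ hi) :
    (lenderSignals.any fun sig => PySem.Str.isIn sig (PySem.Str.slice lower (some lo) (some hi)))
      = (signalSpans lower).any (fun se => decide (lo ≤ se.1) && decide (se.2 ≤ hi)) := by
  have hne : ∀ sig ∈ lenderSignals, sig.toList ≠ [] := by decide
  have hn : PySem.Str.len lower = (lower.toList.length : Int) := by simp [pysem]
  rw [Bool.eq_iff_iff]
  simp only [List.any_eq_true, signalSpans, List.mem_flatMap, List.mem_map, List.mem_filter,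
    PySem.List.mem_pyRange_one, Bool.and_eq_true, decide_eq_true_eq]
  constructor
  · rintro ⟨sig, hmem, hin⟩
    have hLen : PySem.Str.len sig = (sig.toList.length : Int) := by simp [pysem]
    obtain ⟨s, ⟨hs0, hsn⟩, hb, hlos, hshi⟩ :=
      (signal_window_iff lower sig (hne sig hmem) lo hi h0 hlh).1 hin
    exact ⟨(s, s + PySem.Str.len sig),
      ⟨sig, hmem, s, ⟨⟨by omega, by omega⟩, hb⟩, rfl⟩, hlos, hshi⟩
  · rintro ⟨se, ⟨sig, hmem, s, ⟨⟨hs0, hsn⟩, hb⟩, rfl⟩, hlos, hshi⟩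
    have hLen : PySem.Str.len sig = (sig.toList.length : Int) := by simp [pysem]
    exact ⟨sig, hmem, (signal_window_iff lower sig (hne sig hmem) lo hi h0 hlh).2
      ⟨s, ⟨hs0, by omega⟩, hb, hlos, hshi⟩⟩

-- ===== VERDICT (by name: the statement is the Claim_ definition above) =====
theorem rule_based_lender_hints_py_spec : Claim_equal_rule_based_lender_hints_py := by
  intro text orgs _
  unfold Spec_rule_based_lender_hints_py rule_based_lender_hints_py rule_based_lender_hints_py_alt
  refine congrFun (congrFun (congrArg List.foldl (funext fun hints => funext fun org => ?_)) []) orgs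
  by_cases hidx : PySem.Str.find (PySem.Str.lower text) (PySem.Str.lower org) = -1
  · rw [if_pos hidx, if_pos hidx]
  · rw [if_neg hidx, if_neg hidx]
    have hge : -1 ≤ PySem.Str.find (PySem.Str.lower text) (PySem.Str.lower org) := by
      simpa using PySem.Chars.neg_one_le_find (PySem.Str.lower text).toList (PySem.Str.lower org).toList
    have hlen : (0:Int) ≤ PySem.Str.len (PySem.Str.lower org) := by
      simp [pysem]
    show (if (lenderSignals.any fun sig => PySem.Str.isIn sig
              (PySem.Str.slice (PySem.Str.lower text)
                (some (max 0 (PySem.Str.find (PySem.Str.lower text) (PySem.Str.lower org) - 200)))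
                (some (PySem.Str.find (PySem.Str.lower text) (PySem.Str.lower org) + PySem.Str.len (PySem.Str.lower org) + 200)))) = true
          then hints ++ [org] else hints) =
        (if ((signalSpans (PySem.Str.lower text)).any fun se =>
              decide (max 0 (PySem.Str.find (PySem.Str.lower text) (PySem.Str.lower org) - 200) ≤ se.1) &&
              decide (se.2 ≤ PySem.Str.find (PySem.Str.lower text) (PySem.Str.lower org) + PySem.Str.len (PySem.Str.lower org) + 200)) = true
          then hints ++ [org] else hints)
    rw [cond_eq _ _ _ (le_max_left _ _) (by omega)]
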